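-- pv_equiv track=rewrite | github.com/Odegaard11/test1 | test29.py | generate
-- ===== SOURCE A (Python) =====
-- def generate(n):
--     numbers = []
--     exp = 0
--     while 10**exp <= n:
--         numbers.append(n // 10 ** exp % 10)
--         exp += 1
--
--     result = n
--
--     for i in range(len(numbers)):
--         result += numbers[i]
--
--     return result
-- ===== SOURCE B (Python) =====
-- def generate(n):
--     if n <= 0:
--         return n
--     return n + sum(int(c) for c in str(n))
-- ===== Notes on version B (the rewrite author's own statement) =====
-- stated objective: simpler
-- what changed: B converts n to its decimal string and sums the integer value of each character, instead of extracting digits arithmetically into a list via growing powers of ten and summing that list in a second pass.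
import Mathlib
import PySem

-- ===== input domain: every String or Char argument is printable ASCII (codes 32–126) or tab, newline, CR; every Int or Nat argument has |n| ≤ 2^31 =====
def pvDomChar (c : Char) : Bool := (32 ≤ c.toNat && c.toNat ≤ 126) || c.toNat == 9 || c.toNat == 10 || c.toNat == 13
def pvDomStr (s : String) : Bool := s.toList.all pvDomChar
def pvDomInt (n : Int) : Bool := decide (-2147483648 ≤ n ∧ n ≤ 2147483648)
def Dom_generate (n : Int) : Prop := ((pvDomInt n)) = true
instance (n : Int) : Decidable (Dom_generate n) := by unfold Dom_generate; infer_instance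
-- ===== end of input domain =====

-- B computes the digit sum from the decimal string representation (str(n), one int(c) per
-- character) instead of A's arithmetic digit-list construction via growing powers of ten
-- followed by a second summing pass (simpler).

-- ===== PORT A =====
-- the while loop: exp < 10^exp ≤ n bounds exp by n.toNat, giving termination
def generateLoopA (n : Int) (exp : Nat) (numbers : List Int) : List Int :=
  if _h : (10 : Int) ^ exp ≤ n then
    generateLoopA n (exp + 1)
      (numbers ++ [PySem.Int.mod (PySem.Int.floordiv n ((10 : Int) ^ exp)) 10])
  else numbers
termination_by n.toNat - exp
decreasing_by
  have h1 : (exp : Int) < (10 : Int) ^ exp := by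
    have := Nat.lt_pow_self (a := 10) (n := exp) (by norm_num)
    exact_mod_cast this
  omega

def generate (n : Int) : Int :=
  let numbers := generateLoopA n 0 []
  -- for i in range(len(numbers)): result += numbers[i]
  numbers.foldl (fun result x => result + x) n

-- ===== PORT B =====
-- str(n) iterated character by character is PySem.Int.toChars n ((toStr n).toList, lemma
-- PySem.Int.toList_toStr); int(c) is PySem.Int.ofChars? [c] (never none on a digit char of toChars)
def generate_alt (n : Int) : Int :=
  if n ≤ 0 then n
  else n + ((PySem.Int.toChars n).map (fun c => (PySem.Int.ofChars? [c]).getD 0)).sum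

-- ===== PRECONDITION & SPEC =====
def Spec_generate (n : Int) (out : Int) : Prop := out = generate_alt n
instance (n : Int) (out : Int) : Decidable (Spec_generate n out) := by unfold Spec_generate; infer_instance

-- ===== CLAIM (what is proved, stated in full; the proofs are below) =====
def Claim_equal_generate : Prop := ∀ (n : Int), Dom_generate n → Spec_generate n (generate n)

-- ===== LEMMAS AND PROOFS =====

-- int(c) of the character of a single decimal digit is that digit
theorem digitVal_digitChar (d : Nat) (hd : d < 10) :
    (PySem.Int.ofChars? [Nat.digitChar d]).getD 0 = (d : Int) := by
  interval_cases d <;> decide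

-- summing the character values of Nat.toDigitsCore gives the base-10 digit sum
theorem toDigitsCore_sum (fuel : Nat) :
    ∀ (n : Nat) (acc : List Char), n < fuel →
      ((Nat.toDigitsCore 10 fuel n acc).map (fun c => (PySem.Int.ofChars? [c]).getD 0)).sum
        = ((Nat.digits 10 n).sum : Int)
          + ((acc.map (fun c => (PySem.Int.ofChars? [c]).getD 0)).sum) := by
  induction fuel with
  | zero => intro n acc h; omega
  | succ fuel ih =>
    intro n acc _h
    rw [Nat.toDigitsCore]
    by_cases hz : n / 10 = 0
    · have hn10 : n < 10 := by omega
      have hsum : (Nat.digits 10 n).sum = n := by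
        rcases Nat.eq_zero_or_pos n with h0 | h0
        · simp [h0]
        · rw [Nat.digits_def' (by norm_num) h0, hz]
          simp [Nat.mod_eq_of_lt hn10]
      rw [if_pos hz]
      simp only [List.map_cons, List.sum_cons]
      rw [digitVal_digitChar (n % 10) (Nat.mod_lt _ (by norm_num)), hsum,
          Nat.mod_eq_of_lt hn10]
    · have hn10 : 10 ≤ n := by
        by_contra h; exact hz (Nat.div_eq_of_lt (by omega))
      rw [if_neg hz, ih (n / 10) _ (by omega)]
      have hpos : 0 < n := by omega
      rw [Nat.digits_def' (by norm_num : 1 < 10) hpos]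
      simp only [List.map_cons, List.sum_cons,
        digitVal_digitChar (n % 10) (Nat.mod_lt _ (by norm_num))]
      push_cast
      ring

theorem toDigits_sum (n : Nat) :
    ((Nat.toDigits 10 n).map (fun c => (PySem.Int.ofChars? [c]).getD 0)).sum
      = ((Nat.digits 10 n).sum : Int) := by
  rw [Nat.toDigits, toDigitsCore_sum (n + 1) n [] (by omega)]
  simp

-- A's while loop accumulates exactly the base-10 digits of n // 10^exp
theorem loopA_sum (n : Int) (hn : 0 ≤ n) (exp : Nat) (numbers : List Int) :
    (generateLoopA n exp numbers).sum
      = numbers.sum + ((Nat.digits 10 (n / (10 : Int) ^ exp).toNat).sum : Int) := by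
  induction exp, numbers using generateLoopA.induct n with
  | case1 exp numbers h ih =>
    have hpow : (0 : Int) < (10 : Int) ^ exp := by positivity
    have hd10 : PySem.Int.floordiv n ((10 : Int) ^ exp) = n / (10 : Int) ^ exp :=
      PySem.Int.floordiv_eq_ediv_of_pos hpow
    set m : Int := n / (10 : Int) ^ exp with hm
    have hmpos : 0 < m := by
      have := (Int.le_ediv_iff_mul_le (a := 1) (b := n) (c := (10:Int)^exp) hpow).mpr (by omega)
      omega
    have hmod : PySem.Int.mod (PySem.Int.floordiv n ((10 : Int) ^ exp)) 10
        = ((m.toNat % 10 : Nat) : Int) := by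
      rw [hd10, PySem.Int.mod_eq_emod_of_pos (by norm_num)]
      omega
    have hstep : n / (10 : Int) ^ (exp + 1) = m / 10 := by
      rw [hm, pow_succ, ← Int.ediv_ediv_of_nonneg (by positivity)]
    have hstepN : (n / (10 : Int) ^ (exp + 1)).toNat = m.toNat / 10 := by
      rw [hstep]; omega
    rw [generateLoopA]
    simp only [h, dif_pos]
    rw [ih, List.sum_append, hmod, hstepN,
        Nat.digits_def' (by norm_num : 1 < 10) (by omega : 0 < m.toNat)]
    simp only [List.sum_cons, List.sum_nil]
    push_cast
    ring
  | case2 exp numbers h =>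
    have hz : (n / (10 : Int) ^ exp).toNat = 0 := by
      have : n / (10 : Int) ^ exp = 0 := Int.ediv_eq_zero_of_lt hn (by omega)
      omega
    rw [generateLoopA]
    simp only [h, dif_neg, not_false_iff]
    rw [hz]
    simp

theorem foldl_add_sum (l : List Int) (a : Int) :
    l.foldl (fun result x => result + x) a = a + l.sum := by
  induction l generalizing a with
  | nil => simp
  | cons x xs ih => simp [List.foldl, ih, List.sum_cons]; ring

-- ===== VERDICT (by name: the statement is the Claim_ definition above) =====
theorem generate_spec : Claim_equal_generate := by
  intro n _
  unfold Spec_generate generate generate_alt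
  by_cases hn : n ≤ 0
  · have hA : generateLoopA n 0 [] = [] := by
      rw [generateLoopA]; simp only [pow_zero]
      rw [dif_neg (by omega)]
    simp [hA, hn]
  · rw [if_neg hn, foldl_add_sum, loopA_sum n (by omega) 0 []]
    have h1 : (n / (10 : Int) ^ 0).toNat = n.toNat := by simp
    rw [h1]
    have hchars : PySem.Int.toChars n = Nat.toDigits 10 n.toNat := by
      unfold PySem.Int.toChars
      rw [if_neg (by omega)]
    rw [hchars, toDigits_sum]
    simp
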